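-- pv_equiv track=rewrite | github.com/cmblir/algorithm_korea | 프로그래머스/lv1/42862. 체육복/체육복_다른버젼.py | solution
-- ===== SOURCE A (Python) =====
-- def solution(a, lost, reverse):
--     s = set(lost) & set(reverse) # 겹치는 대상 찾기
--     l = set(lost) - s # 필요한 학생에서 겹치는 대상 제외
--     r = set(reverse) - s # 가지고 있는 학생에서 겹치는 대상 제외
--     for i in sorted(r):
--         if i - 1 in l:
--             l.remove(i - 1)
--         elif i + 1 in l:
--             l.remove(i + 1)
--     return a - len(l)
-- ===== SOURCE B (Python) =====
-- def solution(a, lost, reverse):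
--     # Two-pointer sweep over the two sorted disjoint sets instead of
--     # repeated set-membership removal.
--     xs = sorted(set(lost) - set(reverse))   # still need a suit
--     ys = sorted(set(reverse) - set(lost))   # can lend a suit
--     i = j = m = 0
--     while i < len(xs) and j < len(ys):
--         if xs[i] < ys[j] - 1:
--             i += 1
--         elif xs[i] > ys[j] + 1:
--             j += 1
--         else:
--             m += 1
--             i += 1
--             j += 1
--     return a - len(xs) + m
-- ===== Notes on version B (the rewrite author's own statement) =====
-- stated objective: alternative
-- what changed: Replaces the fold that mutates the lost-set (membership test then set removal per reserve) by a two-pointer sweep over the two sorted disjoint sets that counts matches directly; the answer is a - len(lost-only) + matches.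
import Mathlib
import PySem

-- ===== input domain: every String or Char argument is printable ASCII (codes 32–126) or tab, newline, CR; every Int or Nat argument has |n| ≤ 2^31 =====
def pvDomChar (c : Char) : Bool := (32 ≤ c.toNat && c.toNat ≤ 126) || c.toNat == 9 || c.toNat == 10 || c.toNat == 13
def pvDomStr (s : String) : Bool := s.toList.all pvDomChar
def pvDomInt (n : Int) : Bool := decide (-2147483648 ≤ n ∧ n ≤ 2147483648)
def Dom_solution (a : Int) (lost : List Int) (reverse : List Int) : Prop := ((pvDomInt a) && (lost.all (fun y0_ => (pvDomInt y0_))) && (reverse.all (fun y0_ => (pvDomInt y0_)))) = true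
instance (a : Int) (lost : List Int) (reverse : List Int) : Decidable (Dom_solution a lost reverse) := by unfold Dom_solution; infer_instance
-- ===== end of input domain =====

-- B replaces A's per-reserve set-membership-and-removal loop by a two-pointer sweep
-- over the two sorted disjoint sets (alternative algorithm, same result).


-- ===== PORT A =====
-- loop body of A's 'for i in sorted(r)':  remove i-1 from l if present, else i+1.
-- ('l.remove(x)' is Set.remove?; under the membership guard it returns 'some', so '.getD l' is exact.)
def pyStep (l : PySem.Set Int) (i : Int) : PySem.Set Int :=
  if PySem.Set.contains l (i - 1) then (PySem.Set.remove? l (i - 1)).getD l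
  else if PySem.Set.contains l (i + 1) then (PySem.Set.remove? l (i + 1)).getD l
  else l

def solution (a : Int) (lost : List Int) (reverse : List Int) : Int :=
  let s := PySem.Set.inter (PySem.Set.ofList lost) (PySem.Set.ofList reverse)
  let l := PySem.Set.diff (PySem.Set.ofList lost) s
  let r := PySem.Set.diff (PySem.Set.ofList reverse) s
  let l := List.foldl pyStep l (PySem.List.sorted r (fun x => x))
  a - PySem.Set.len l

-- ===== PORT B =====
-- the while loop of Source B, as recursion on the two index suffixes
def tpCount : List Int → List Int → Int
  | [], _ => 0
  | _ :: _, [] => 0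
  | x :: xs, y :: ys =>
    if x < y - 1 then tpCount xs (y :: ys)
    else if x > y + 1 then tpCount (x :: xs) ys
    else 1 + tpCount xs ys
termination_by xs ys => xs.length + ys.length
decreasing_by all_goals simp [List.length_cons] <;> omega

def solution_alt (a : Int) (lost : List Int) (reverse : List Int) : Int :=
  let xs := PySem.List.sorted (PySem.Set.diff (PySem.Set.ofList lost) (PySem.Set.ofList reverse)) (fun x => x)
  let ys := PySem.List.sorted (PySem.Set.diff (PySem.Set.ofList reverse) (PySem.Set.ofList lost)) (fun x => x)
  a - (xs.length : Int) + tpCount xs ys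

-- ===== PRECONDITION & SPEC =====
def Spec_solution (a : Int) (lost : List Int) (reverse : List Int) (out : Int) : Prop := out = solution_alt a lost reverse
instance (a : Int) (lost : List Int) (reverse : List Int) (out : Int) : Decidable (Spec_solution a lost reverse out) := by unfold Spec_solution; infer_instance

-- ===== CLAIM (what is proved, stated in full; the proofs are below) =====
def Claim_equal_solution : Prop := ∀ (a : Int) (lost : List Int) (reverse : List Int), Dom_solution a lost reverse → Spec_solution a lost reverse (solution a lost reverse)

-- ===== LEMMAS AND PROOFS =====

theorem pyStep_of_mem_sub {l : List Int} {i : Int} (h : (i - 1) ∈ l) :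
    pyStep l i = l.filter (fun y => !(y == i - 1)) := by
  simp [pyStep, PySem.Set.contains, PySem.Set.remove?, PySem.Set.discard, h]

theorem pyStep_of_mem_add {l : List Int} {i : Int} (h1 : (i - 1) ∉ l) (h2 : (i + 1) ∈ l) :
    pyStep l i = l.filter (fun y => !(y == i + 1)) := by
  simp [pyStep, PySem.Set.contains, PySem.Set.remove?, PySem.Set.discard, h1, h2]

theorem pyStep_of_not_mem {l : List Int} {i : Int} (h1 : (i - 1) ∉ l) (h2 : (i + 1) ∉ l) :
    pyStep l i = l := by
  simp [pyStep, PySem.Set.contains, h1, h2]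

theorem fold_pyStep_nil (ys : List Int) : List.foldl pyStep [] ys = [] := by
  induction ys with
  | nil => rfl
  | cons y ys ih =>
    simp only [List.foldl_cons, pyStep_of_not_mem (List.not_mem_nil) (List.not_mem_nil)]
    exact ih

theorem pyStep_perm {l l' : List Int} (i : Int) (h : l.Perm l') :
    (pyStep l i).Perm (pyStep l' i) := by
  by_cases h1 : (i - 1) ∈ l
  · rw [pyStep_of_mem_sub h1, pyStep_of_mem_sub (h.mem_iff.mp h1)]
    exact h.filter _
  · by_cases h2 : (i + 1) ∈ l
    · rw [pyStep_of_mem_add h1 h2,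
        pyStep_of_mem_add (fun hc => h1 (h.mem_iff.mpr hc)) (h.mem_iff.mp h2)]
      exact h.filter _
    · rw [pyStep_of_not_mem h1 h2,
        pyStep_of_not_mem (fun hc => h1 (h.mem_iff.mpr hc)) (fun hc => h2 (h.mem_iff.mpr hc))]
      exact h

theorem fold_pyStep_perm {l l' : List Int} (ys : List Int) (h : l.Perm l') :
    (List.foldl pyStep l ys).Perm (List.foldl pyStep l' ys) := by
  induction ys generalizing l l' with
  | nil => exact h
  | cons y ys ih => exact ih (pyStep_perm y h)

theorem fold_pyStep_cons_lt {x : Int} {xs ys : List Int} (h : ∀ y ∈ ys, x < y - 1) :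
    List.foldl pyStep (x :: xs) ys = x :: List.foldl pyStep xs ys := by
  induction ys generalizing xs with
  | nil => rfl
  | cons y ys ih =>
    have hx : x < y - 1 := h y (List.mem_cons_self)
    have hstep : pyStep (x :: xs) y = x :: pyStep xs y := by
      have hne1 : x ≠ y - 1 := by omega
      have hne2 : x ≠ y + 1 := by omega
      by_cases h1 : (y - 1) ∈ xs
      · have : (y - 1) ∈ x :: xs := List.mem_cons_of_mem _ h1
        rw [pyStep_of_mem_sub this, pyStep_of_mem_sub h1, List.filter_cons_of_pos (by simpa)]
      · have h1' : (y - 1) ∉ x :: xs := by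
          intro hc
          rcases List.mem_cons.mp hc with h | h
          · omega
          · exact h1 h
        by_cases h2 : (y + 1) ∈ xs
        · have : (y + 1) ∈ x :: xs := List.mem_cons_of_mem _ h2
          rw [pyStep_of_mem_add h1' this, pyStep_of_mem_add h1 h2,
            List.filter_cons_of_pos (by simpa)]
        · have h2' : (y + 1) ∉ x :: xs := by
            intro hc
            rcases List.mem_cons.mp hc with h | h
            · omega
            · exact h2 h
          rw [pyStep_of_not_mem h1' h2', pyStep_of_not_mem h1 h2]
    simp only [List.foldl_cons, hstep]
    exact ih (fun y' hy' => h y' (List.mem_cons_of_mem _ hy'))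

theorem tpCount_nil (xs : List Int) : tpCount xs [] = 0 := by
  cases xs <;> simp [tpCount]

theorem main_invariant : ∀ (n : Nat) (xs ys : List Int), xs.length + ys.length ≤ n →
    xs.Pairwise (· < ·) → ys.Pairwise (· < ·) → (∀ x ∈ xs, x ∉ ys) →
    ((List.foldl pyStep xs ys).length : Int) = (xs.length : Int) - tpCount xs ys := by
  intro n
  induction n with
  | zero =>
    intro xs ys hlen _ _ _
    have hxs : xs = [] := by cases xs <;> simp_all
    have hys : ys = [] := by cases ys <;> simp_all
    subst hxs; subst hys; simp [tpCount]
  | succ n ih =>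
    intro xs ys hlen hxs hys hdisj
    cases ys with
    | nil => simp [tpCount_nil]
    | cons y ys' =>
      cases xs with
      | nil => rw [fold_pyStep_nil]; simp [tpCount]
      | cons x xs' =>
        have hxlt : ∀ z ∈ xs', x < z := by
          intro z hz; exact (List.pairwise_cons.mp hxs).1 z hz
        have hylt : ∀ z ∈ ys', y < z := by
          intro z hz; exact (List.pairwise_cons.mp hys).1 z hz
        have hxs' : xs'.Pairwise (· < ·) := (List.pairwise_cons.mp hxs).2
        have hys' : ys'.Pairwise (· < ·) := (List.pairwise_cons.mp hys).2
        have hxny : x ≠ y := fun hc => hdisj x List.mem_cons_self (hc ▸ List.mem_cons_self)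
        by_cases hc1 : x < y - 1
        · -- x can never be matched: it stays in front of the fold state
          rw [fold_pyStep_cons_lt (by
            intro z hz
            rcases List.mem_cons.mp hz with h | h
            · omega
            · have := hylt z h; omega)]
          have := ih xs' (y :: ys') (by simp at hlen ⊢; omega) hxs' hys
            (fun z hz => hdisj z (List.mem_cons_of_mem _ hz))
          simp only [tpCount, if_pos hc1, List.length_cons]
          push_cast
          omega
        · by_cases hc2 : x > y + 1
          · -- y matches nothing: the fold state is unchanged by y
            have hstep : pyStep (x :: xs') y = x :: xs' := by
              apply pyStep_of_not_mem
              · intro hc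
                rcases List.mem_cons.mp hc with h | h
                · omega
                · have := hxlt _ h; omega
              · intro hc
                rcases List.mem_cons.mp hc with h | h
                · omega
                · have := hxlt _ h; omega
            rw [List.foldl_cons, hstep]
            have := ih (x :: xs') ys' (by simp at hlen ⊢; omega) hxs hys'
              (fun z hz hz' => hdisj z hz (List.mem_cons_of_mem _ hz'))
            simp only [tpCount, if_neg hc1, if_pos hc2]
            omega
          · -- x = y - 1 or x = y + 1: they match, both drop their head
            have hxor : x = y - 1 ∨ x = y + 1 := by omega
            have hstep : pyStep (x :: xs') y = xs' := by
              rcases hxor with h | h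
              · rw [pyStep_of_mem_sub (h ▸ List.mem_cons_self),
                  List.filter_cons_of_neg (by simp [h]),
                  List.filter_eq_self.mpr (by
                    intro z hz
                    have := hxlt z hz
                    simp; omega)]
              · have hnm : (y - 1) ∉ x :: xs' := by
                  intro hc
                  rcases List.mem_cons.mp hc with hm | hm
                  · omega
                  · have := hxlt _ hm; omega
                rw [pyStep_of_mem_add hnm (h ▸ List.mem_cons_self),
                  List.filter_cons_of_neg (by simp [h]),
                  List.filter_eq_self.mpr (by
                    intro z hz
                    have := hxlt z hz
                    simp; omega)]
            rw [List.foldl_cons, hstep]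
            have := ih xs' ys' (by simp at hlen ⊢; omega) hxs' hys'
              (fun z hz hz' => hdisj z (List.mem_cons_of_mem _ hz) (List.mem_cons_of_mem _ hz'))
            simp only [tpCount, if_neg hc1, if_neg hc2, List.length_cons]
            push_cast
            omega

-- removing the intersection from one operand of a set difference is removing the other operand
theorem diff_inter_left (s t : List Int) :
    PySem.Set.diff s (PySem.Set.inter s t) = PySem.Set.diff s t := by
  unfold PySem.Set.diff
  apply List.filter_congr
  intro x hx
  have h : (PySem.Set.inter s t).contains x = t.contains x := by
    rw [Bool.eq_iff_iff]
    simp [PySem.Set.inter, PySem.Set.contains, List.mem_filter, hx]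
  rw [h]; rfl

theorem diff_inter_right (s t : List Int) :
    PySem.Set.diff t (PySem.Set.inter s t) = PySem.Set.diff t s := by
  unfold PySem.Set.diff
  apply List.filter_congr
  intro x hx
  have h : (PySem.Set.inter s t).contains x = s.contains x := by
    rw [Bool.eq_iff_iff]
    simp [PySem.Set.inter, PySem.Set.contains, List.mem_filter, hx]
  rw [h]; rfl

theorem pairwise_lt_of_sorted_nodup {l : List Int} (h : l.Nodup) :
    (PySem.List.sorted l (fun x => x)).Pairwise (· < ·) := by
  have hle := PySem.List.sorted_pairwise l (fun x => x)
  have hnd : (PySem.List.sorted l (fun x => x)).Nodup :=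
    (PySem.List.sorted_perm l (fun x => x) false).nodup_iff.mpr h
  exact (hle.and hnd).imp (fun h => lt_of_le_of_ne h.1 h.2)

-- ===== VERDICT (by name: the statement is the Claim_ definition above) =====
theorem solution_spec : Claim_equal_solution := by
  intro a lost reverse _
  unfold Spec_solution solution solution_alt
  simp only [diff_inter_left, diff_inter_right]
  set lostS := PySem.Set.ofList lost with hlostS
  set revS := PySem.Set.ofList reverse with hrevS
  set lB := PySem.Set.diff lostS revS with hlB
  set rB := PySem.Set.diff revS lostS with hrB
  set xs := PySem.List.sorted lB (fun x => x) with hxs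
  set ys := PySem.List.sorted rB (fun x => x) with hys
  have hpermL : lB.Perm xs := (PySem.List.sorted_perm lB (fun x => x) false).symm
  have hfold : (List.foldl pyStep lB ys).length = (List.foldl pyStep xs ys).length :=
    (fold_pyStep_perm ys hpermL).length_eq
  have hndL : lB.Nodup := (PySem.Set.nodup_ofList lost).filter _
  have hndR : rB.Nodup := (PySem.Set.nodup_ofList reverse).filter _
  have hdisj : ∀ x ∈ xs, x ∉ ys := by
    intro x hx hy
    have hx' : x ∈ lB := (PySem.List.sorted_perm lB (fun x => x) false).mem_iff.mp hx
    have hy' : x ∈ rB := (PySem.List.sorted_perm rB (fun x => x) false).mem_iff.mp hy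
    have h1 := (PySem.Set.mem_diff lostS revS x).mp hx'
    have h2 := (PySem.Set.mem_diff revS lostS x).mp hy'
    exact h1.2 h2.1
  have hmain := main_invariant (xs.length + ys.length) xs ys le_rfl
    (pairwise_lt_of_sorted_nodup hndL) (pairwise_lt_of_sorted_nodup hndR) hdisj
  have hlen : PySem.Set.len (List.foldl pyStep lB ys) = ((List.foldl pyStep xs ys).length : Int) := by
    simp [PySem.Set.len, hfold]
  have hlenxs : ((PySem.List.sorted lB fun x => x).length : Int) = (xs.length : Int) := by rw [← hxs]
  rw [hlen, hmain]
  omega
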